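-- pv_equiv track=rewrite | github.com/PyLabRobot/pylabrobot | pylabrobot/hamilton/liquid_handlers/star/autoload.py | _decode_hex_bitmask_to_track_list
-- ===== SOURCE A (Python) =====
-- from typing import TYPE_CHECKING, Dict, List, Literal, Optional, Tuple
--
-- def _decode_hex_bitmask_to_track_list(mask_hex: str) -> List[int]:
--   """Decode a hex occupancy bitmask of arbitrary length.
--
--   Each hex nibble = 4 slots. Slot numbering starts at 1 from the rightmost nibble (LSB).
--   """
--   mask_hex = mask_hex.strip()
--
--   if not all(c in "0123456789abcdefABCDEF" for c in mask_hex):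
--     raise ValueError(f"Invalid hex in mask: {mask_hex!r}")
--
--   slots: List[int] = []
--   bit_index = 1
--
--   for nibble in reversed(mask_hex):
--     val = int(nibble, 16)
--     for bit in range(4):
--       if val & (1 << bit):
--         slots.append(bit_index)
--       bit_index += 1
--
--   return sorted(slots)
-- ===== SOURCE B (Python) =====
-- def _decode_hex_bitmask_to_track_list(mask_hex):
--   """Decode a hex occupancy bitmask of arbitrary length.
--
--   Each hex nibble = 4 slots. Slot numbering starts at 1 from the rightmost nibble (LSB).
--   """
--   mask_hex = mask_hex.strip()
--
--   if not all(c in "0123456789abcdefABCDEF" for c in mask_hex):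
--     raise ValueError(f"Invalid hex in mask: {mask_hex!r}")
--
--   if not mask_hex:
--     return []
--
--   n = int(mask_hex, 16)
--   return [i + 1 for i in range(n.bit_length()) if (n >> i) & 1]
-- ===== Notes on version B (the rewrite author's own statement) =====
-- stated objective: simpler
-- what changed: Instead of looping over reversed nibbles with an inner 4-bit loop and a running bit_index counter and then sorting, B converts the whole string at once with int(mask_hex, 16) and lists the set bits of that single integer (already in increasing order, so sorted() disappears).
import Mathlib
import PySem

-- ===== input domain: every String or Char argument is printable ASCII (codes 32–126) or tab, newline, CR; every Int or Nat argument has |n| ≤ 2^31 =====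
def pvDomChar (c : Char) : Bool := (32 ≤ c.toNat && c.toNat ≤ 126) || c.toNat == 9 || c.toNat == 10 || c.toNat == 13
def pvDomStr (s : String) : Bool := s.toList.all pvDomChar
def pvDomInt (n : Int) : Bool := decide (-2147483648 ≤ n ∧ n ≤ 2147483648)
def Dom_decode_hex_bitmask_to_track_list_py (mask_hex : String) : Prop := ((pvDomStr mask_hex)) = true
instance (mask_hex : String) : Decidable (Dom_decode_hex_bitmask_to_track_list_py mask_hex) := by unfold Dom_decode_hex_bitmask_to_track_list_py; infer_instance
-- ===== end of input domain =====

-- B replaces the reversed nibble-by-nibble loop + bit_index counter + sorted() by one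
-- whole-string int(mask_hex, 16) conversion and an enumeration of that integer's set bits
-- (objective: simpler).

-- ===== PORT A =====
-- int(c, 16) for a single hex digit (both ports reach it only on validated hex chars)
def pvHexVal (c : Char) : Nat :=
  if '0' ≤ c ∧ c ≤ '9' then c.toNat - 48
  else if 'a' ≤ c ∧ c ≤ 'f' then c.toNat - 87
  else if 'A' ≤ c ∧ c ≤ 'F' then c.toNat - 55
  else 0

def decode_hex_bitmask_to_track_list_py (mask_hex : String) : List Int :=
  let s := (PySem.Str.strip mask_hex).toList
  -- the `all(... )` hex validation raises ValueError on failure: excluded by Pre_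
  let st := s.reverse.foldl (fun (st : List Int × Int) nibble =>
      let val := pvHexVal nibble
      (List.range 4).foldl (fun (st : List Int × Int) bit =>
        let st := if val &&& (1 <<< bit) ≠ 0 then (st.1 ++ [st.2], st.2) else st
        (st.1, st.2 + 1)) st) ([], 1)
  PySem.List.sorted st.1 (fun x => x) false

-- ===== PORT B =====
def decode_hex_bitmask_to_track_list_py_alt (mask_hex : String) : List Int :=
  let s := (PySem.Str.strip mask_hex).toList
  -- same hex validation (raises on failure: excluded by Pre_)
  if s = [] then []
  else
    let n := s.foldl (fun acc c => acc * 16 + pvHexVal c) 0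
    ((List.range (Nat.size n)).filter (fun i => (n >>> i) &&& 1 ≠ 0)).map (fun (i : Nat) => (i : Int) + 1)

-- ===== PRECONDITION & SPEC =====
def pvIsHex (c : Char) : Bool := c ∈ "0123456789abcdefABCDEF".toList

-- Pre_ excludes exactly the inputs on which A raises ValueError (a non-hex character after strip)
def Pre_decode_hex_bitmask_to_track_list_py (mask_hex : String) : Prop :=
  ((PySem.Str.strip mask_hex).toList.all pvIsHex) = true
instance (mask_hex : String) : Decidable (Pre_decode_hex_bitmask_to_track_list_py mask_hex) := by unfold Pre_decode_hex_bitmask_to_track_list_py; infer_instance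

def pvWitness_decode_hex_bitmask_to_track_list_py : String := " a3 "

def Spec_decode_hex_bitmask_to_track_list_py (mask_hex : String) (out : List Int) : Prop := out = decode_hex_bitmask_to_track_list_py_alt mask_hex
instance (mask_hex : String) (out : List Int) : Decidable (Spec_decode_hex_bitmask_to_track_list_py mask_hex out) := by unfold Spec_decode_hex_bitmask_to_track_list_py; infer_instance

-- ===== CLAIM (what is proved, stated in full; the proofs are below) =====
def Claim_equal_decode_hex_bitmask_to_track_list_py : Prop := ∀ (mask_hex : String), Dom_decode_hex_bitmask_to_track_list_py mask_hex → Pre_decode_hex_bitmask_to_track_list_py mask_hex → Spec_decode_hex_bitmask_to_track_list_py mask_hex (decode_hex_bitmask_to_track_list_py mask_hex)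

-- ===== LEMMAS AND PROOFS =====

-- value of a LSB-first list of hex digits
def pvDv : List Nat → Nat
  | [] => 0
  | d :: ds => d + 16 * pvDv ds

-- A's inner 4-bit block starting at bit index b
def pvBits4 (d : Nat) (b : Int) : List Int :=
  ((List.range 4).filter (fun i => d.testBit i)).map (fun (i : Nat) => b + (i : Int))

-- A's whole bit enumeration over LSB-first digits, starting at bit index b
def pvBitsFrom : List Nat → Int → List Int
  | [], _ => []
  | d :: ds, b => pvBits4 d b ++ pvBitsFrom ds (b + 4)

lemma pvBitA (d i : Nat) : (d &&& (1 <<< i) ≠ 0) ↔ d.testBit i := by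
  rw [Nat.one_shiftLeft, Nat.and_two_pow]
  rcases h : d.testBit i <;> simp [Nat.pos_iff_ne_zero.symm]

lemma pvBitB (n i : Nat) : decide ((n >>> i) &&& 1 ≠ 0) = n.testBit i := by
  rcases h : n.testBit i <;> simp_all [Nat.testBit, Nat.and_comm]

-- A's inner loop over range(4)
lemma pvInnerA (d : Nat) (acc : List Int) (b : Int) :
    (List.range 4).foldl (fun (st : List Int × Int) bit =>
        let st := if d &&& (1 <<< bit) ≠ 0 then (st.1 ++ [st.2], st.2) else st
        (st.1, st.2 + 1)) (acc, b)
    = (acc ++ pvBits4 d b, b + 4) := by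
  have e : ∀ i, (d &&& (1 <<< i) ≠ 0) = (d.testBit i = true) := by
    intro i; rw [eq_iff_iff]; exact (pvBitA d i).trans Iff.rfl
  have h4 : List.range 4 = [0, 1, 2, 3] := rfl
  rw [h4]
  simp only [List.foldl, pvBits4, e]
  by_cases h0 : d.testBit 0 <;> by_cases h1 : d.testBit 1 <;>
    by_cases h2 : d.testBit 2 <;> by_cases h3 : d.testBit 3 <;>
    simp [h0, h1, h2, h3, h4, List.filter] <;> and_intros <;> ring

-- A's outer loop over the digits
lemma pvOuterA (cs : List Char) (acc : List Int) (b : Int) :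
    cs.foldl (fun (st : List Int × Int) nibble =>
        let val := pvHexVal nibble
        (List.range 4).foldl (fun (st : List Int × Int) bit =>
          let st := if val &&& (1 <<< bit) ≠ 0 then (st.1 ++ [st.2], st.2) else st
          (st.1, st.2 + 1)) st) (acc, b)
    = (acc ++ pvBitsFrom (cs.map pvHexVal) b, b + 4 * cs.length) := by
  induction cs generalizing acc b with
  | nil => simp [pvBitsFrom]
  | cons d ds ih =>
    simp only [List.foldl, List.map, pvBitsFrom]
    rw [pvInnerA, ih]
    simp only [Prod.mk.injEq]
    exact ⟨by simp, by simp only [List.length_cons]; push_cast; ring⟩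

-- membership bound for pvBits4
lemma pvBits4_mem (d : Nat) (b x : Int) (hx : x ∈ pvBits4 d b) : b ≤ x ∧ x < b + 4 := by
  simp only [pvBits4, List.mem_map, List.mem_filter, List.mem_range] at hx
  obtain ⟨i, ⟨hi, _⟩, rfl⟩ := hx
  omega

lemma pvBitsFrom_mem (ds : List Nat) (b x : Int) (hx : x ∈ pvBitsFrom ds b) :
    b ≤ x ∧ x < b + 4 * ds.length := by
  induction ds generalizing b with
  | nil => simp [pvBitsFrom] at hx
  | cons d ds ih =>
    simp only [pvBitsFrom, List.mem_append] at hx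
    rcases hx with hx | hx
    · have := pvBits4_mem d b x hx
      simp only [List.length_cons]
      push_cast; omega
    · have := ih (b + 4) hx
      simp only [List.length_cons]
      push_cast at this ⊢; omega

lemma pvBits4_pairwise (d : Nat) (b : Int) : (pvBits4 d b).Pairwise (· < ·) := by
  apply List.Pairwise.map
  · intro i j (h : i < j); exact by omega
  · exact (List.pairwise_lt_range.filter _)

lemma pvBitsFrom_pairwise (ds : List Nat) (b : Int) : (pvBitsFrom ds b).Pairwise (· < ·) := by
  induction ds generalizing b with
  | nil => simp [pvBitsFrom]
  | cons d ds ih =>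
    simp only [pvBitsFrom]
    refine List.pairwise_append.mpr ⟨pvBits4_pairwise d b, ih (b + 4), ?_⟩
    intro x hx y hy
    have h1 := pvBits4_mem d b x hx
    have h2 := pvBitsFrom_mem ds (b + 4) y hy
    omega

-- pvBitsFrom as the bits of the single number pvDv
lemma pvBitsFrom_eq (ds : List Nat) (b : Int) (hd : ∀ d ∈ ds, d < 16) :
    pvBitsFrom ds b
      = ((List.range (4 * ds.length)).filter (fun i => (pvDv ds).testBit i)).map
          (fun (i : Nat) => b + (i : Int)) := by
  induction ds generalizing b with
  | nil => simp [pvBitsFrom]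
  | cons d ds ih =>
    have hd0 : d < 16 := hd d (by simp)
    have hrange : List.range (4 * (d :: ds).length) = List.range 4 ++ (List.range (4 * ds.length)).map (4 + ·) := by
      have : 4 * (d :: ds).length = 4 + 4 * ds.length := by simp [List.length_cons]; ring
      rw [this, List.range_add]
    have htb : ∀ i, (pvDv (d :: ds)).testBit i = if i < 4 then d.testBit i else (pvDv ds).testBit (i - 4) := by
      intro i
      have : pvDv (d :: ds) = 2 ^ 4 * pvDv ds + d := by simp [pvDv]; ring
      rw [this]
      exact Nat.testBit_two_pow_mul_add (pvDv ds) (by omega) i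
    rw [pvBitsFrom, hrange, List.filter_append, List.map_append, pvBits4,
        ih (b + 4) (fun x hx => hd x (by simp [hx]))]
    congr 1
    · congr 1
      apply List.filter_congr
      intro i hi
      simp only [List.mem_range] at hi
      simp [htb i, hi]
    · rw [List.filter_map, List.map_map]
      have hq : ∀ i ∈ List.range (4 * ds.length),
          ((fun i => (pvDv (d :: ds)).testBit i) ∘ (fun x => 4 + x)) i = (pvDv ds).testBit i := by
        intro i _
        simp only [Function.comp_apply, htb (4 + i), if_neg (by omega : ¬ 4 + i < 4),
          Nat.add_sub_cancel_left]
      rw [List.filter_congr hq]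
      apply List.map_congr_left
      intro i _
      simp only [Function.comp_apply]
      push_cast; ring

-- B's accumulator fold is the LSB-first digit value of the reversed list
lemma pvFoldVal (cs : List Char) (a : Nat) :
    cs.foldl (fun acc c => acc * 16 + pvHexVal c) a
      = a * 16 ^ cs.length + pvDv (cs.reverse.map pvHexVal) := by
  induction cs generalizing a with
  | nil => simp [pvDv]
  | cons c cs ih =>
    have happ : ∀ (xs : List Nat) (d : Nat), pvDv (xs ++ [d]) = pvDv xs + d * 16 ^ xs.length := by
      intro xs d
      induction xs with
      | nil => simp [pvDv]
      | cons x xs ihx => simp [pvDv, ihx]; ring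
    simp only [List.foldl, List.reverse_cons, List.map_append, List.map]
    rw [ih, happ]
    simp [pow_succ]
    ring

-- digit values are < 16 and dv is bounded
lemma pvDv_lt (ds : List Nat) (hd : ∀ d ∈ ds, d < 16) : pvDv ds < 2 ^ (4 * ds.length) := by
  induction ds with
  | nil => simp [pvDv]
  | cons d ds ih =>
    have h1 := hd d (by simp)
    have h2 := ih (fun x hx => hd x (by simp [hx]))
    simp only [pvDv, List.length_cons]
    calc d + 16 * pvDv ds < 16 * (pvDv ds + 1) := by omega
      _ ≤ 16 * 2 ^ (4 * ds.length) := by omega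
      _ = 2 ^ (4 * (ds.length + 1)) := by rw [mul_add, mul_one, pow_add]; ring

-- bits above size are zero: the filtered ranges agree
lemma pvFilter_range_ext (n a b : Nat) (hsz : Nat.size n ≤ a) (hab : a ≤ b) :
    (List.range b).filter (fun i => n.testBit i) = (List.range a).filter (fun i => n.testBit i) := by
  have : b = a + (b - a) := by omega
  rw [this, List.range_add, List.filter_append]
  have : (List.map (a + ·) (List.range (b - a))).filter (fun i => n.testBit i) = [] := by
    rw [List.filter_eq_nil_iff]
    intro x hx
    simp only [List.mem_map] at hx
    obtain ⟨i, _, rfl⟩ := hx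
    have hlt : n < 2 ^ (a + i) := lt_of_lt_of_le (Nat.lt_size_self n)
      (Nat.pow_le_pow_right (by norm_num) (by omega))
    simp [Nat.testBit_lt_two_pow hlt]
  rw [this, List.append_nil]

lemma pvHexVal_lt (c : Char) : pvHexVal c < 16 := by
  unfold pvHexVal
  have hc : c.toNat = c.val.toNat := rfl
  split_ifs with h1 h2 h3
  · have h2 := h1.2
    rw [Char.le_def, UInt32.le_iff_toNat_le] at h2
    have hf : ('9' : Char).val.toNat = 57 := rfl
    omega
  · have h2 := h2.2
    rw [Char.le_def, UInt32.le_iff_toNat_le] at h2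
    have hf : ('f' : Char).val.toNat = 102 := rfl
    omega
  · have h2 := h3.2
    rw [Char.le_def, UInt32.le_iff_toNat_le] at h2
    have hf : ('F' : Char).val.toNat = 70 := rfl
    omega
  · omega

-- ===== VERDICT (by name: the statement is the Claim_ definition above) =====
theorem decode_hex_bitmask_to_track_list_py_spec : Claim_equal_decode_hex_bitmask_to_track_list_py := by
  intro mask_hex _ hpre
  unfold Spec_decode_hex_bitmask_to_track_list_py
  unfold decode_hex_bitmask_to_track_list_py decode_hex_bitmask_to_track_list_py_alt
  set cs := (PySem.Str.strip mask_hex).toList with hcs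
  simp only []
  set ds := cs.reverse.map pvHexVal with hds
  have hdlt : ∀ d ∈ ds, d < 16 := by
    intro d hd
    simp only [hds, List.mem_map] at hd
    obtain ⟨c, _, rfl⟩ := hd
    exact pvHexVal_lt c
  -- A's fold
  rw [pvOuterA cs.reverse [] 1]
  simp only [List.nil_append]
  rw [← hds]
  -- A's list is strictly increasing, so sorted is the identity
  have hsorted : PySem.List.sorted (pvBitsFrom ds 1) (fun x : Int => x) = pvBitsFrom ds 1 :=
    PySem.List.sorted_eq_of_perm_of_pairwise_lt _ _ _ (List.Perm.refl _) (pvBitsFrom_pairwise ds 1)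
  rw [hsorted]
  -- the number computed by B
  have hn : cs.foldl (fun acc c => acc * 16 + pvHexVal c) 0 = pvDv ds := by
    rw [pvFoldVal]; simp [hds]
  by_cases hnil : cs = []
  · simp [hnil, hds, pvBitsFrom]
  · rw [if_neg hnil, hn]
    have hlen : ds.length = cs.length := by simp [hds]
    have hsz : Nat.size (pvDv ds) ≤ 4 * ds.length := Nat.size_le.mpr (pvDv_lt ds hdlt)
    rw [pvBitsFrom_eq ds 1 hdlt,
        pvFilter_range_ext (pvDv ds) (Nat.size (pvDv ds)) (4 * ds.length) le_rfl hsz]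
    rw [List.filter_congr (q := fun i => (pvDv ds).testBit i) (fun i _ => pvBitB (pvDv ds) i)]
    apply List.map_congr_left
    intro i _
    exact add_comm 1 (i : Int)
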